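-- pv_equiv track=rewrite | github.com/THCKing247/testing-grounds | Automation Service Python/1_data_clean_engine.py | detect_crm_type
-- ===== SOURCE A (Python) =====
-- def detect_crm_type(headers: list[str]) -> str | None:
--     """Detect CRM type from column headers"""
--     headers_lower = [h.lower().strip() for h in headers]
--
--     # Salesforce indicators
--     sf_indicators = ["firstname", "lastname", "mailingstreet", "mailingcity", "createddate"]
--     if any(ind in headers_lower for ind in sf_indicators):
--         return "salesforce"
--
--     # HubSpot indicators
--     hs_indicators = ["firstname", "lastname", "lifecyclestage", "createdate", "hs_lastmodifieddate"]
--     if any(ind in headers_lower for ind in hs_indicators):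
--         return "hubspot"
--
--     # Pipedrive indicators
--     pd_indicators = ["org_name", "owner_name", "add_time", "update_time"]
--     if any(ind in headers_lower for ind in pd_indicators):
--         return "pipedrive"
--
--     return None
-- ===== SOURCE B (Python) =====
-- def detect_crm_type(headers: list[str]) -> str | None:
--     """Detect CRM type from column headers"""
--     names = ["salesforce", "hubspot", "pipedrive"]
--     indicators = [
--         ["firstname", "lastname", "mailingstreet", "mailingcity", "createddate"],
--         ["firstname", "lastname", "lifecyclestage", "createdate", "hs_lastmodifieddate"],
--         ["org_name", "owner_name", "add_time", "update_time"],
--     ]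
--     # build the indicator -> priority-rank index in reverse priority order,
--     # so on overlapping indicators the higher-priority (smaller rank) CRM wins
--     index = {}
--     for rank, inds in reversed(list(enumerate(indicators))):
--         for ind in inds:
--             index[ind] = rank
--     best = None
--     for h in headers:
--         r = index.get(h.lower().strip())
--         if r is not None and (best is None or r < best):
--             best = r
--     return None if best is None else names[best]
-- ===== Notes on version B (the rewrite author's own statement) =====
-- stated objective: faster
-- what changed: Replaced the three repeated any()-scans over the normalized header list with an indicator->rank dict built once in reverse priority order and a single minimum-rank pass over the headers.
import Mathlib
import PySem

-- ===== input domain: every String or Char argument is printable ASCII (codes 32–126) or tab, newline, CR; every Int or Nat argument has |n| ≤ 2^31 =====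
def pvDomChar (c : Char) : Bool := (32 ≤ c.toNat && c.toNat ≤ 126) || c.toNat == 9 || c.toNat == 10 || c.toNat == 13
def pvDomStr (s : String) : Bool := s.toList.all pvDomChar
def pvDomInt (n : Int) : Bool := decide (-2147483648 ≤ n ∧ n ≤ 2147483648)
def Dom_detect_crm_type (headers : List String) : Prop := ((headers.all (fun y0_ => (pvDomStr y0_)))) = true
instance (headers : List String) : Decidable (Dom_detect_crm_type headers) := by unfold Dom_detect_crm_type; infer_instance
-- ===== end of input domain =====

-- B replaces A's three repeated any()-scans with an indicator->rank index built in
-- reverse priority order plus a single minimum-rank pass over the headers (measured faster by a constant factor).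

-- ===== PORT A =====
def detect_crm_type (headers : List String) : Option String :=
  let headers_lower := headers.map (fun h => PySem.Str.strip (PySem.Str.lower h))
  let sf_indicators : List String := ["firstname", "lastname", "mailingstreet", "mailingcity", "createddate"]
  if sf_indicators.any (fun ind => headers_lower.contains ind) then some "salesforce"
  else
    let hs_indicators : List String := ["firstname", "lastname", "lifecyclestage", "createdate", "hs_lastmodifieddate"]
    if hs_indicators.any (fun ind => headers_lower.contains ind) then some "hubspot"
    else
      let pd_indicators : List String := ["org_name", "owner_name", "add_time", "update_time"]
      if pd_indicators.any (fun ind => headers_lower.contains ind) then some "pipedrive"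
      else none

-- ===== PORT B =====
def pvNames : List String := ["salesforce", "hubspot", "pipedrive"]

def pvIndicators : List (List String) := [
  ["firstname", "lastname", "mailingstreet", "mailingcity", "createddate"],
  ["firstname", "lastname", "lifecyclestage", "createdate", "hs_lastmodifieddate"],
  ["org_name", "owner_name", "add_time", "update_time"]]

-- index = {}; for rank, inds in reversed(list(enumerate(indicators))): for ind in inds: index[ind] = rank
def pvIndex : PySem.Dict String Int :=
  (PySem.List.enumerate pvIndicators).reverse.foldl
    (fun d p => p.2.foldl (fun d ind => d.insert ind p.1) d) PySem.Dict.empty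

-- r = index.get(h.lower().strip()); if r is not None and (best is None or r < best): best = r
def pvStep (best : Option Int) (h : String) : Option Int :=
  match PySem.Dict.get? pvIndex (PySem.Str.strip (PySem.Str.lower h)), best with
  | some r, none => some r
  | some r, some b => if r < b then some r else some b
  | none, _ => best

def detect_crm_type_alt (headers : List String) : Option String :=
  match headers.foldl pvStep none with
  | none => none
  | some r => PySem.List.pyGet? pvNames r   -- names[best]; r is always 0, 1 or 2 here

-- ===== PRECONDITION & SPEC =====
def Spec_detect_crm_type (headers : List String) (out : Option String) : Prop := out = detect_crm_type_alt headers
instance (headers : List String) (out : Option String) : Decidable (Spec_detect_crm_type headers out) := by unfold Spec_detect_crm_type; infer_instance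

-- ===== CLAIM (what is proved, stated in full; the proofs are below) =====
def Claim_equal_detect_crm_type : Prop := ∀ (headers : List String), Dom_detect_crm_type headers → Spec_detect_crm_type headers (detect_crm_type headers)

-- ===== LEMMAS AND PROOFS =====

def pvSfL : List String := ["firstname", "lastname", "mailingstreet", "mailingcity", "createddate"]
def pvHsxL : List String := ["lifecyclestage", "createdate", "hs_lastmodifieddate"]
def pvPdL : List String := ["org_name", "owner_name", "add_time", "update_time"]

-- what the index lookup returns, as a membership if-chain
lemma pv_get_char (h : String) : PySem.Dict.get? pvIndex h =
    (if h ∈ pvSfL then some 0 else if h ∈ pvHsxL then some 1 else if h ∈ pvPdL then some 2 else none) := by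
  have e : pvIndex = PySem.Dict.mk [("org_name", 2), ("owner_name", 2), ("add_time", 2), ("update_time", 2), ("firstname", 0), ("lastname", 0), ("lifecyclestage", 1), ("createdate", 1), ("hs_lastmodifieddate", 1), ("mailingstreet", 0), ("mailingcity", 0), ("createddate", 0)] := rfl
  rw [e]
  simp only [PySem.Dict.get?_mk_cons]
  by_cases h0 : (("org_name" : String) == h)
  · have := (beq_iff_eq.mp h0).symm; subst this; simp [pvSfL, pvHsxL, pvPdL]
  rw [if_neg h0]
  by_cases h1 : (("owner_name" : String) == h)
  · have := (beq_iff_eq.mp h1).symm; subst this; simp [pvSfL, pvHsxL, pvPdL]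
  rw [if_neg h1]
  by_cases h2 : (("add_time" : String) == h)
  · have := (beq_iff_eq.mp h2).symm; subst this; simp [pvSfL, pvHsxL, pvPdL]
  rw [if_neg h2]
  by_cases h3 : (("update_time" : String) == h)
  · have := (beq_iff_eq.mp h3).symm; subst this; simp [pvSfL, pvHsxL, pvPdL]
  rw [if_neg h3]
  by_cases h4 : (("firstname" : String) == h)
  · have := (beq_iff_eq.mp h4).symm; subst this; simp [pvSfL, pvHsxL, pvPdL]
  rw [if_neg h4]
  by_cases h5 : (("lastname" : String) == h)
  · have := (beq_iff_eq.mp h5).symm; subst this; simp [pvSfL, pvHsxL, pvPdL]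
  rw [if_neg h5]
  by_cases h6 : (("lifecyclestage" : String) == h)
  · have := (beq_iff_eq.mp h6).symm; subst this; simp [pvSfL, pvHsxL, pvPdL]
  rw [if_neg h6]
  by_cases h7 : (("createdate" : String) == h)
  · have := (beq_iff_eq.mp h7).symm; subst this; simp [pvSfL, pvHsxL, pvPdL]
  rw [if_neg h7]
  by_cases h8 : (("hs_lastmodifieddate" : String) == h)
  · have := (beq_iff_eq.mp h8).symm; subst this; simp [pvSfL, pvHsxL, pvPdL]
  rw [if_neg h8]
  by_cases h9 : (("mailingstreet" : String) == h)
  · have := (beq_iff_eq.mp h9).symm; subst this; simp [pvSfL, pvHsxL, pvPdL]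
  rw [if_neg h9]
  by_cases h10 : (("mailingcity" : String) == h)
  · have := (beq_iff_eq.mp h10).symm; subst this; simp [pvSfL, pvHsxL, pvPdL]
  rw [if_neg h10]
  by_cases h11 : (("createddate" : String) == h)
  · have := (beq_iff_eq.mp h11).symm; subst this; simp [pvSfL, pvHsxL, pvPdL]
  rw [if_neg h11]
  have hm : h ∉ pvSfL ∧ h ∉ pvHsxL ∧ h ∉ pvPdL := by
    simp only [pvSfL, pvHsxL, pvPdL, List.mem_cons, List.not_mem_nil, or_false]
    refine ⟨?_, ?_, ?_⟩ <;> rintro (rfl|rfl|rfl|rfl|rfl) <;> simp_all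
  simp [PySem.Dict.get?, hm.1, hm.2.1, hm.2.2]

def pvOmin : Option Int → Option Int → Option Int
  | none, y => y
  | some b, none => some b
  | some b, some r => some (min b r)

lemma pv_step_eq (best : Option Int) (h : String) :
    pvStep best h = pvOmin best (PySem.Dict.get? pvIndex (PySem.Str.strip (PySem.Str.lower h))) := by
  unfold pvStep
  rcases PySem.Dict.get? pvIndex (PySem.Str.strip (PySem.Str.lower h)) with _ | r <;>
    rcases best with _ | b
  · rfl
  · rfl
  · rfl
  · simp only [pvOmin]
    rcases lt_or_ge r b with hlt | hge
    · rw [if_pos hlt, min_eq_right hlt.le]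
    · rw [if_neg (not_lt.mpr hge), min_eq_left hge]

def pvM : List String → Option Int
  | [] => none
  | h :: t => pvOmin (PySem.Dict.get? pvIndex h) (pvM t)

lemma pv_omin_assoc (a b c : Option Int) : pvOmin (pvOmin a b) c = pvOmin a (pvOmin b c) := by
  rcases a with _ | a <;> rcases b with _ | b <;> rcases c with _ | c <;>
    simp [pvOmin, min_assoc]

lemma pv_fold_eq (hl : List String) (best : Option Int) :
    hl.foldl (fun b h => pvOmin b (PySem.Dict.get? pvIndex h)) best = pvOmin best (pvM hl) := by
  induction hl generalizing best with
  | nil => cases best <;> rfl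
  | cons h t ih => simp only [List.foldl_cons, ih, pvM, ← pv_omin_assoc]

-- pvM as A's if-chain of any-scans
lemma pv_M_char (hl : List String) : pvM hl =
    (if hl.any (fun h => pvSfL.contains h) then some 0
     else if hl.any (fun h => pvHsxL.contains h) then some 1
     else if hl.any (fun h => pvPdL.contains h) then some 2
     else none) := by
  induction hl with
  | nil => rfl
  | cons h t ih =>
    simp only [pvM, ih, pv_get_char, List.any_cons, List.contains_eq_mem, Bool.or_eq_true,
      decide_eq_true_eq]
    by_cases h1 : h ∈ pvSfL <;> by_cases h2 : h ∈ pvHsxL <;> by_cases h3 : h ∈ pvPdL <;>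
      by_cases t1 : t.any (fun x => decide (x ∈ pvSfL)) = true <;>
      by_cases t2 : t.any (fun x => decide (x ∈ pvHsxL)) = true <;>
      by_cases t3 : t.any (fun x => decide (x ∈ pvPdL)) = true <;>
      simp [h1, h2, h3, t1, t2, t3, pvOmin]

lemma pv_any_swap (xs ys : List String) :
    xs.any (fun a => ys.contains a) = ys.any (fun b => xs.contains b) := by
  rw [Bool.eq_iff_iff]
  simp only [List.any_eq_true, List.contains_eq_mem, decide_eq_true_eq]
  constructor <;> rintro ⟨a, ha, hb⟩ <;> exact ⟨a, hb, ha⟩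

-- under no salesforce match, A's full hubspot list matches iff the hubspot-only list does
lemma pv_hs_reduce (hl : List String)
    (hsf : ¬ hl.any (fun h => pvSfL.contains h) = true) :
    hl.any (fun h => (["firstname", "lastname", "lifecyclestage", "createdate", "hs_lastmodifieddate"] : List String).contains h)
      = hl.any (fun h => pvHsxL.contains h) := by
  rw [Bool.eq_iff_iff]
  simp only [List.any_eq_true, List.contains_eq_mem, decide_eq_true_eq] at *
  constructor
  · rintro ⟨a, ha, hb⟩
    refine ⟨a, ha, ?_⟩
    simp only [pvHsxL, List.mem_cons, List.not_mem_nil, or_false]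
    simp only [List.mem_cons, List.not_mem_nil, or_false] at hb
    rcases hb with rfl | rfl | rfl | rfl | rfl
    · exact absurd ⟨"firstname", ha, by simp [pvSfL]⟩ hsf
    · exact absurd ⟨"lastname", ha, by simp [pvSfL]⟩ hsf
    · tauto
    · tauto
    · tauto
  · rintro ⟨a, ha, hb⟩
    refine ⟨a, ha, ?_⟩
    simp only [pvHsxL, List.mem_cons, List.not_mem_nil, or_false] at hb
    simp only [List.mem_cons]
    tauto

-- ===== VERDICT (by name: the statement is the Claim_ definition above) =====
theorem detect_crm_type_spec : Claim_equal_detect_crm_type := by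
  intro headers _
  show detect_crm_type headers = detect_crm_type_alt headers
  simp only [detect_crm_type, detect_crm_type_alt]
  have hfold : headers.foldl pvStep none
      = pvM (headers.map (fun h => PySem.Str.strip (PySem.Str.lower h))) := by
    have hs : pvStep = fun b h => pvOmin b (PySem.Dict.get? pvIndex (PySem.Str.strip (PySem.Str.lower h))) :=
      funext fun b => funext fun h => pv_step_eq b h
    rw [hs, show (headers.foldl (fun b h => pvOmin b (PySem.Dict.get? pvIndex (PySem.Str.strip (PySem.Str.lower h)))) none)
        = ((headers.map (fun h => PySem.Str.strip (PySem.Str.lower h))).foldl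
            (fun b h => pvOmin b (PySem.Dict.get? pvIndex h)) none) from by rw [List.foldl_map],
      pv_fold_eq]
    rcases pvM (headers.map (fun h => PySem.Str.strip (PySem.Str.lower h))) with _ | r <;> rfl
  rw [hfold, pv_M_char]
  set hl := headers.map (fun h => PySem.Str.strip (PySem.Str.lower h)) with hhl
  rw [pv_any_swap (["firstname", "lastname", "mailingstreet", "mailingcity", "createddate"] : List String) hl,
      pv_any_swap (["firstname", "lastname", "lifecyclestage", "createdate", "hs_lastmodifieddate"] : List String) hl,
      pv_any_swap (["org_name", "owner_name", "add_time", "update_time"] : List String) hl]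
  have esf : (fun h => (["firstname", "lastname", "mailingstreet", "mailingcity", "createddate"] : List String).contains h) = (fun h => pvSfL.contains h) := rfl
  have epd : (fun h => (["org_name", "owner_name", "add_time", "update_time"] : List String).contains h) = (fun h => pvPdL.contains h) := rfl
  rw [esf, epd]
  by_cases hsf : hl.any (fun h => pvSfL.contains h) = true
  · rw [if_pos hsf, if_pos hsf]; rfl
  · rw [pv_hs_reduce hl hsf, if_neg hsf, if_neg hsf]
    by_cases hhs : hl.any (fun h => pvHsxL.contains h) = true
    · rw [if_pos hhs, if_pos hhs]; rfl
    · rw [if_neg hhs, if_neg hhs]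
      by_cases hpd : hl.any (fun h => pvPdL.contains h) = true
      · rw [if_pos hpd, if_pos hpd]; rfl
      · rw [if_neg hpd, if_neg hpd]
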